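-- pv_equiv track=rewrite | github.com/amaurea/sogma | python/cuts.py | keep_last
-- ===== SOURCE A (Python) =====
-- def keep_last(vals):
-- 	seen = set()
-- 	res  = []
-- 	for val in vals[::-1]:
-- 		if val in seen: continue
-- 		res.append(val)
-- 		seen.add(val)
-- 	res = res[::-1]
-- 	return res
-- ===== SOURCE B (Python) =====
-- def keep_last(vals):
-- 	last = {}
-- 	for i, val in enumerate(vals):
-- 		last[val] = i
-- 	res = []
-- 	for i, val in enumerate(vals):
-- 		if last[val] == i:
-- 			res.append(val)
-- 	return res
-- ===== Notes on version B (the rewrite author's own statement) =====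
-- stated objective: alternative
-- what changed: Replaces the reverse/seen-set/reverse scheme with two forward passes: a dict of each value's last index, then emitting a value exactly at its last index; no reversal and no set.
import Mathlib
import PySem

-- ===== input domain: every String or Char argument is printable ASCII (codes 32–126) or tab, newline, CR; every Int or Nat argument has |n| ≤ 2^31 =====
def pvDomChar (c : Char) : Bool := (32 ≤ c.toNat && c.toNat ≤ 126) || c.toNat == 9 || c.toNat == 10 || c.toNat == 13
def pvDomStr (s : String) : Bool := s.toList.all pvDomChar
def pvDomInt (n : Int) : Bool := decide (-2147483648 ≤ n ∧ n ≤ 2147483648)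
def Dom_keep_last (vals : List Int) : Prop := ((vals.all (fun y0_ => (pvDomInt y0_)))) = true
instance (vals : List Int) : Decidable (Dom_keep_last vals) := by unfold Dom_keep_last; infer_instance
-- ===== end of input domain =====

-- B replaces the reverse / seen-set / reverse scheme with two forward passes over a
-- last-occurrence-index dict (objective: alternative).


-- ===== PORT A =====
def keep_last (vals : List Int) : List Int :=
  let rev := (PySem.List.slice? vals none none (-1)).getD []   -- vals[::-1]
  let st := rev.foldl
    (fun (p : PySem.Set Int × List Int) val =>
      if PySem.Set.contains p.1 val then p
      else (PySem.Set.add p.1 val, p.2 ++ [val]))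
    (PySem.Set.empty, [])
  (PySem.List.slice? st.2 none none (-1)).getD []              -- res[::-1]

-- ===== PORT B =====
def keep_last_alt (vals : List Int) : List Int :=
  let last : PySem.Dict Int Int :=
    (PySem.List.enumerate vals 0).foldl (fun d p => d.insert p.2 p.1) PySem.Dict.empty
  (PySem.List.enumerate vals 0).foldl
    (fun res p => if last.get? p.2 == some p.1 then res ++ [p.2] else res) []

-- ===== PRECONDITION & SPEC =====
def Spec_keep_last (vals : List Int) (out : List Int) : Prop := out = keep_last_alt vals
instance (vals : List Int) (out : List Int) : Decidable (Spec_keep_last vals out) := by unfold Spec_keep_last; infer_instance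

-- ===== CLAIM (what is proved, stated in full; the proofs are below) =====
def Claim_equal_keep_last : Prop := ∀ (vals : List Int), Dom_keep_last vals → Spec_keep_last vals (keep_last vals)

-- ===== LEMMAS AND PROOFS =====

-- reference function: keep the last occurrence of each value, in order
def refKL : List Int → List Int
  | [] => []
  | x :: xs => if x ∈ xs then refKL xs else x :: refKL xs

-- A's loop keeps seen = res throughout
theorem keepA_pair (t : List Int) : ∀ (s : PySem.Set Int),
    t.foldl
      (fun (p : PySem.Set Int × List Int) val =>
        if PySem.Set.contains p.1 val then p
        else (PySem.Set.add p.1 val, p.2 ++ [val])) (s, s)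
    = (t.foldl PySem.Set.add s, t.foldl PySem.Set.add s) := by
  induction t with
  | nil => intro s; rfl
  | cons v t ih =>
    intro s
    simp only [List.foldl_cons]
    by_cases h : PySem.Set.contains s v = true
    · rw [if_pos h]
      have ha : PySem.Set.add s v = s := by unfold PySem.Set.add; rw [if_pos h]
      rw [ha, ih s]
    · rw [if_neg h]
      have ha : PySem.Set.add s v = s ++ [v] := by unfold PySem.Set.add; rw [if_neg h]
      rw [ha, ih (s ++ [v])]

theorem keepA_eq (vals : List Int) :
    keep_last vals = (PySem.Set.ofList vals.reverse).reverse := by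
  unfold keep_last
  rw [PySem.List.slice?_none_none_neg_one]
  simp only [Option.getD_some]
  rw [show (PySem.Set.empty : PySem.Set Int) = ([] : List Int) from rfl]
  rw [keepA_pair vals.reverse ([] : List Int)]
  rw [PySem.List.slice?_none_none_neg_one]
  simp [PySem.Set.ofList_eq_foldl]

theorem refKL_eq_A (l : List Int) : (PySem.Set.ofList l.reverse).reverse = refKL l := by
  induction l with
  | nil => rfl
  | cons x xs ih =>
    simp only [List.reverse_cons, refKL]
    rw [PySem.Set.ofList_eq_foldl, List.foldl_append, ← PySem.Set.ofList_eq_foldl]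
    simp only [List.foldl_cons, List.foldl_nil, PySem.Set.add]
    by_cases h : x ∈ xs
    · have hc : PySem.Set.contains (PySem.Set.ofList xs.reverse) x = true := by
        rw [PySem.Set.contains_iff, PySem.Set.mem_ofList, List.mem_reverse]; exact h
      simp [h, ih]
    · have hc : PySem.Set.contains (PySem.Set.ofList xs.reverse) x = false := by
        rw [Bool.eq_false_iff]
        intro hcc
        rw [PySem.Set.contains_iff, PySem.Set.mem_ofList, List.mem_reverse] at hcc
        exact h hcc
      simp [h, ih]

theorem refKL_append (ys : List Int) (x : Int) :
    refKL (ys ++ [x]) = (refKL ys).filter (fun y => !(y == x)) ++ [x] := by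
  induction ys with
  | nil => simp [refKL]
  | cons y ys ih =>
    simp only [List.cons_append, refKL]
    by_cases hyx : y = x
    · subst hyx
      simp only [List.mem_append, List.mem_singleton, or_true, if_true, ih]
      by_cases h : y ∈ ys
      · simp [h]
      · simp [h]
    · by_cases h : y ∈ ys
      · simp [h, hyx, ih]
      · have hno : ¬ y ∈ ys ++ [x] := by simp [h, hyx]
        simp [h, hno, ih, hyx]

theorem keepB_eq (vals : List Int) : keep_last_alt vals = refKL vals := by
  induction vals using List.reverseRecOn with
  | nil => rfl
  | append_singleton ys x ih =>
    unfold keep_last_alt at ih ⊢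
    rw [PySem.List.foldl_append_if] at ih ⊢
    rw [PySem.List.enumerate_append]
    simp only [List.foldl_append, List.filter_append, List.map_append, List.nil_append] at *
    set D := (PySem.List.enumerate ys 0).foldl (fun d p => d.insert p.2 p.1) PySem.Dict.empty with hD
    simp only [PySem.List.enumerate, List.foldl_cons, List.foldl_nil, List.filter_cons,
      List.filter_nil] at *
    have hself : (D.insert x (0 + (ys.length : Int))).get? x = some (0 + (ys.length : Int)) :=
      PySem.Dict.get?_insert_self D x _
    rw [refKL_append, ← ih]
    have hfilter :
        (PySem.List.enumerate ys 0).filter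
            (fun p => (D.insert x (0 + (ys.length : Int))).get? p.2 == some p.1)
        = ((PySem.List.enumerate ys 0).filter (fun p => D.get? p.2 == some p.1)).filter
            (fun p => !(p.2 == x)) := by
      rw [List.filter_filter]
      apply List.filter_congr
      intro p hp
      obtain ⟨k, hk, hpe⟩ := (PySem.List.mem_enumerate_iff _ _ _).mp hp
      by_cases hx : p.2 = x
      · rw [hx, hself]
        have h1 : p.1 < (ys.length : Int) := by
          rw [hpe]; push_cast; omega
        simp
        omega
      · simp [PySem.Dict.get?_insert_of_ne, hx]
    rw [hfilter, hself]
    simp only [beq_self_eq_true, if_true]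
    congr 1
    rw [List.filter_map]
    rfl

-- ===== VERDICT (by name: the statement is the Claim_ definition above) =====
theorem keep_last_spec : Claim_equal_keep_last := by
  intro vals _
  unfold Spec_keep_last
  rw [keepA_eq, refKL_eq_A, keepB_eq]
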